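-- pv_equiv track=rewrite | github.com/IraitzM/PrologResurrected | prologresurrected/game/memory_stack_puzzle.py | _split_conditions
-- ===== SOURCE A (Python) =====
-- from typing import Dict, List, Any, Optional, Tuple, Set
--
-- def _split_conditions(query_body: str) -> List[str]:
--     """
--     Split compound query into individual conditions.
--
--     Handles commas inside parentheses correctly.
--
--     Args:
--         query_body: The query body to split
--
--     Returns:
--         List of condition strings
--     """
--     conditions = []
--     current_condition = []
--     paren_depth = 0
--
--     for char in query_body:
--         if char == "(":
--             paren_depth += 1
--             current_condition.append(char)
--         elif char == ")":
--             paren_depth -= 1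
--             current_condition.append(char)
--         elif char == "," and paren_depth == 0:
--             # This comma separates conditions
--             conditions.append("".join(current_condition))
--             current_condition = []
--         else:
--             current_condition.append(char)
--
--     # Add the last condition
--     if current_condition:
--         conditions.append("".join(current_condition))
--
--     return conditions
-- ===== SOURCE B (Python) =====
-- from typing import List
--
--
-- def _split_conditions(query_body: str) -> List[str]:
--     """Split compound query into conditions (commas inside parens kept).
--
--     Right-to-left scan: a comma is top-level iff the parenthesis balance of
--     the suffix to its right equals the total balance of the whole string.
--     """
--     total = 0
--     for ch in query_body:
--         if ch == "(":
--             total += 1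
--         elif ch == ")":
--             total -= 1
--
--     segs = []
--     cur = []
--     bal = 0
--     for ch in reversed(query_body):
--         if ch == "," and bal == total:
--             segs.append("".join(reversed(cur)))
--             cur = []
--         else:
--             cur.append(ch)
--             if ch == "(":
--                 bal += 1
--             elif ch == ")":
--                 bal -= 1
--     segs.append("".join(reversed(cur)))
--     segs.reverse()
--     if segs[-1] == "":
--         segs.pop()
--     return segs
-- ===== Notes on version B (the rewrite author's own statement) =====
-- stated objective: alternative
-- what changed: B replaces A's single left-to-right depth-tracking accumulator with two passes: it first computes the total parenthesis balance, then scans right-to-left, cutting at commas whose suffix balance equals the total (equivalent to prefix depth 0) and building the segment list back-to-front.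
import Mathlib
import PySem

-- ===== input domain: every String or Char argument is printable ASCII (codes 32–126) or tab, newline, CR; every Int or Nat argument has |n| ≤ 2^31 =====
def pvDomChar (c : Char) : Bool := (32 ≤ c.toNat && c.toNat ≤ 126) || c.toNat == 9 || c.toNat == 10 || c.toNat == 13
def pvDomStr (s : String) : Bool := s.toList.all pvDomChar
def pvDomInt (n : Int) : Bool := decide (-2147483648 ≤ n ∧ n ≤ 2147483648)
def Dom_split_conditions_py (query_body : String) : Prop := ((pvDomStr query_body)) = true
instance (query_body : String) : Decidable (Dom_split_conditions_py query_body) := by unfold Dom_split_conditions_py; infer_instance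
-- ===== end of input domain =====

-- B changes the traversal: total balance first, then a right-to-left scan building back-to-front (alternative decomposition, same cost).

-- ===== PORT A =====
-- state: (conditions, current_condition, paren_depth)
def split_conditions_py (query_body : String) : List String :=
  let st := query_body.toList.foldl
    (fun (st : List String × List Char × Int) char =>
      if char = '(' then (st.1, st.2.1 ++ [char], st.2.2 + 1)
      else if char = ')' then (st.1, st.2.1 ++ [char], st.2.2 - 1)
      else if char = ',' ∧ st.2.2 = 0 then (st.1 ++ [String.ofList st.2.1], [], st.2.2)
      else (st.1, st.2.1 ++ [char], st.2.2))
    ([], [], 0)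
  if st.2.1 ≠ [] then st.1 ++ [String.ofList st.2.1] else st.1

-- ===== PORT B =====
-- pass 1: total balance; pass 2: fold over the reversed characters, state (segs, cur, bal)
def split_conditions_py_alt (query_body : String) : List String :=
  let cs := query_body.toList
  let total : Int := cs.foldl
    (fun (t : Int) ch => if ch = '(' then t + 1 else if ch = ')' then t - 1 else t) 0
  let st := cs.reverse.foldl
    (fun (st : List String × List Char × Int) ch =>
      if ch = ',' ∧ st.2.2 = total then (st.1 ++ [String.ofList st.2.1.reverse], [], st.2.2)
      else (st.1, st.2.1 ++ [ch],
            if ch = '(' then st.2.2 + 1 else if ch = ')' then st.2.2 - 1 else st.2.2))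
    ([], [], 0)
  let segs := (st.1 ++ [String.ofList st.2.1.reverse]).reverse
  if segs.getLastD "" = "" then segs.dropLast else segs

-- ===== PRECONDITION & SPEC =====
def Spec_split_conditions_py (query_body : String) (out : List String) : Prop := out = split_conditions_py_alt query_body
instance (query_body : String) (out : List String) : Decidable (Spec_split_conditions_py query_body out) := by unfold Spec_split_conditions_py; infer_instance

-- ===== CLAIM (what is proved, stated in full; the proofs are below) =====
def Claim_equal_split_conditions_py : Prop := ∀ (query_body : String), Dom_split_conditions_py query_body → Spec_split_conditions_py query_body (split_conditions_py query_body)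

-- ===== LEMMAS AND PROOFS =====

-- net parenthesis contribution of one character / of a list
def pvDelta (c : Char) : Int := if c = '(' then 1 else if c = ')' then -1 else 0
def pvBal (t : List Char) : Int := (t.map pvDelta).sum

-- reference segmentation: (first segment, remaining segments), splitting at commas at depth 0
def pvSeg : List Char → Int → List Char × List (List Char)
  | [], _ => ([], [])
  | c :: cs, d =>
    if c = ',' ∧ d = 0 then ([], (pvSeg cs d).1 :: (pvSeg cs d).2)
    else (c :: (pvSeg cs (d + pvDelta c)).1, (pvSeg cs (d + pvDelta c)).2)

theorem pvBal_cons (c : Char) (t : List Char) : pvBal (c :: t) = pvDelta c + pvBal t := by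
  simp [pvBal]

theorem a_inv (t : List Char) : ∀ (d : Int) (conds : List String) (cur : List Char),
    t.foldl
      (fun (st : List String × List Char × Int) char =>
        if char = '(' then (st.1, st.2.1 ++ [char], st.2.2 + 1)
        else if char = ')' then (st.1, st.2.1 ++ [char], st.2.2 - 1)
        else if char = ',' ∧ st.2.2 = 0 then (st.1 ++ [String.ofList st.2.1], [], st.2.2)
        else (st.1, st.2.1 ++ [char], st.2.2))
      (conds, cur, d)
    = (conds ++ (((cur ++ (pvSeg t d).1) :: (pvSeg t d).2).dropLast.map String.ofList),
       ((cur ++ (pvSeg t d).1) :: (pvSeg t d).2).getLastD [],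
       d + pvBal t) := by
  induction t with
  | nil => intro d conds cur; simp [pvSeg, pvBal]
  | cons c cs ih =>
    intro d conds cur
    simp only [List.foldl_cons]
    split_ifs with h1 h2 h3
    · subst h1
      rw [ih (d + 1) conds (cur ++ ['('])]
      have hs : pvSeg ('(' :: cs) d = ('(' :: (pvSeg cs (d + 1)).1, (pvSeg cs (d + 1)).2) := by
        simp [pvSeg, pvDelta]
      rw [hs, pvBal_cons]
      have hd : pvDelta '(' = 1 := by decide
      simp [List.append_assoc, hd]
      omega
    · subst h2
      rw [ih (d - 1) conds (cur ++ [')'])]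
      have hs : pvSeg (')' :: cs) d = (')' :: (pvSeg cs (d - 1)).1, (pvSeg cs (d - 1)).2) := by
        have : d + pvDelta ')' = d - 1 := by have : pvDelta ')' = -1 := by decide
                                             omega
        simp [pvSeg, this]
      rw [hs, pvBal_cons]
      have hd : pvDelta ')' = -1 := by decide
      simp [List.append_assoc, hd]
      omega
    · obtain ⟨hc1, hc2⟩ := h3; subst hc1; subst hc2
      rw [ih 0 (conds ++ [String.ofList cur]) []]
      have hs : pvSeg (',' :: cs) 0 = ([], (pvSeg cs 0).1 :: (pvSeg cs 0).2) := by
        simp [pvSeg]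
      rw [hs, pvBal_cons]
      have hd : pvDelta ',' = 0 := by decide
      simp [hd]
    · rw [ih d conds (cur ++ [c])]
      have hd : pvDelta c = 0 := by simp [pvDelta, h1, h2]
      have hs : pvSeg (c :: cs) d = (c :: (pvSeg cs d).1, (pvSeg cs d).2) := by
        have harg : d + pvDelta c = d := by omega
        simp [pvSeg, h3, harg]
      rw [hs, pvBal_cons, hd]
      simp [List.append_assoc]

theorem b_inv (t : List Char) (total : Int) :
    t.reverse.foldl
      (fun (st : List String × List Char × Int) ch =>
        if ch = ',' ∧ st.2.2 = total then (st.1 ++ [String.ofList st.2.1.reverse], [], st.2.2)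
        else (st.1, st.2.1 ++ [ch],
              if ch = '(' then st.2.2 + 1 else if ch = ')' then st.2.2 - 1 else st.2.2))
      ([], [], 0)
    = (((pvSeg t (total - pvBal t)).2.map String.ofList).reverse,
       (pvSeg t (total - pvBal t)).1.reverse,
       pvBal t) := by
  induction t with
  | nil => simp [pvSeg, pvBal]
  | cons c cs ih =>
    rw [List.reverse_cons, List.foldl_append, ih]
    by_cases hc : c = ',' ∧ pvBal cs = total
    · obtain ⟨hc1, hc2⟩ := hc; subst hc1
      have hb : pvBal (',' :: cs) = pvBal cs := by
        have hd : pvDelta ',' = 0 := by decide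
        rw [pvBal_cons, hd]; ring
      have h0 : total - pvBal cs = 0 := by omega
      have hcnd : (',' = ',' ∧ pvBal cs = total) := ⟨rfl, hc2⟩
      rw [List.foldl_cons, List.foldl_nil]
      simp only [hb, h0]
      have hs : pvSeg (',' :: cs) 0 = ([], (pvSeg cs 0).1 :: (pvSeg cs 0).2) := by
        simp [pvSeg]
      rw [hs]
      simp [hc2]
    · have hb : pvBal (c :: cs) = pvDelta c + pvBal cs := pvBal_cons c cs
      have hcond : ¬ (c = ',' ∧ pvBal cs = total) := hc
      have hseg : pvSeg (c :: cs) (total - pvBal (c :: cs))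
          = (c :: (pvSeg cs (total - pvBal cs)).1, (pvSeg cs (total - pvBal cs)).2) := by
        have hns : ¬ (c = ',' ∧ total - pvBal (c :: cs) = 0) := by
          rintro ⟨h1, h2⟩
          subst h1
          have hd0 : pvDelta ',' = 0 := by decide
          rw [hb, hd0] at h2
          exact hcond ⟨rfl, by omega⟩
        have harg : total - pvBal (c :: cs) + pvDelta c = total - pvBal cs := by
          rw [hb]; ring
        simp [pvSeg, hns, harg]
      simp only [List.foldl_cons, List.foldl_nil, if_neg hcond, hseg]
      have hdep : (if c = '(' then pvBal cs + 1 else if c = ')' then pvBal cs - 1 else pvBal cs)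
          = pvBal (c :: cs) := by
        rw [hb]; by_cases h1 : c = '(' <;> by_cases h2 : c = ')' <;>
          simp [pvDelta, h1, h2] <;> ring
      simp [hdep]

theorem bal_fold (t : List Char) : ∀ (a : Int),
    t.foldl (fun (x : Int) ch => if ch = '(' then x + 1 else if ch = ')' then x - 1 else x) a
      = a + pvBal t := by
  induction t with
  | nil => intro a; simp [pvBal]
  | cons c cs ih =>
    intro a
    rw [List.foldl_cons, ih]
    have : (if c = '(' then a + 1 else if c = ')' then a - 1 else a) = a + pvDelta c := by
      by_cases h1 : c = '(' <;> by_cases h2 : c = ')' <;> simp [pvDelta, h1, h2] <;> omega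
    rw [this, pvBal_cons]; ring

theorem mk_eq_empty_iff (l : List Char) : (String.ofList l = "") ↔ l = [] := by
  rw [show ("" : String) = String.ofList [] from rfl]
  exact String.ofList_inj

theorem mapmk_getLastD (ss : List (List Char)) (s : List Char) :
    (ss.map String.ofList).getLastD (String.ofList s) = String.ofList (ss.getLastD s) := by
  induction ss generalizing s with
  | nil => simp
  | cons a l ih => simp only [List.map_cons, List.getLastD_cons]; exact ih a

theorem getLastD_cons_irrel (a : List Char) (l : List (List Char)) (d₁ d₂ : List Char) :
    (a :: l).getLastD d₁ = (a :: l).getLastD d₂ := by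
  induction l generalizing a with
  | nil => simp
  | cons b m ih => simp only [List.getLastD_cons]

theorem dropLast_concat_getLastD (s₀ : List Char) (ss : List (List Char)) :
    (s₀ :: ss).dropLast ++ [(s₀ :: ss).getLastD []] = s₀ :: ss := by
  induction ss generalizing s₀ with
  | nil => simp
  | cons a l ih =>
    rw [List.dropLast_cons_of_ne_nil (by simp), List.getLastD_cons, List.cons_append]
    rw [getLastD_cons_irrel a l s₀ []]
    rw [ih a]

theorem final_assemble (s₀ : List Char) (ss : List (List Char)) :
    (if ((s₀ :: ss).getLastD []) ≠ [] then
        ((s₀ :: ss).dropLast.map String.ofList) ++ [String.ofList ((s₀ :: ss).getLastD [])]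
      else ((s₀ :: ss).dropLast.map String.ofList))
    = (if ((s₀ :: ss).map String.ofList).getLastD "" = "" then
        ((s₀ :: ss).map String.ofList).dropLast
      else (s₀ :: ss).map String.ofList) := by
  have hmap : ((s₀ :: ss).map String.ofList).getLastD "" = String.ofList ((s₀ :: ss).getLastD []) := by
    rw [List.map_cons, List.getLastD_cons, List.getLastD_cons, mapmk_getLastD]
  rw [hmap]
  by_cases h : (s₀ :: ss).getLastD [] = []
  · rw [if_neg (by simpa using h), if_pos (by rw [(mk_eq_empty_iff _).mpr h]),
      List.map_dropLast]
  · rw [if_pos h, if_neg (by simpa [mk_eq_empty_iff] using h)]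
    calc ((s₀ :: ss).dropLast.map String.ofList) ++ [String.ofList ((s₀ :: ss).getLastD [])]
        = ((s₀ :: ss).dropLast ++ [(s₀ :: ss).getLastD []]).map String.ofList := by
          rw [List.map_append]; simp
      _ = (s₀ :: ss).map String.ofList := by rw [dropLast_concat_getLastD]

-- ===== VERDICT (by name: the statement is the Claim_ definition above) =====
theorem split_conditions_py_spec : Claim_equal_split_conditions_py := by
  intro q _
  unfold Spec_split_conditions_py split_conditions_py split_conditions_py_alt
  simp only
  rw [a_inv q.toList 0 [] [], b_inv q.toList
    (q.toList.foldl (fun (t : Int) ch => if ch = '(' then t + 1 else if ch = ')' then t - 1 else t) 0)]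
  rw [bal_fold q.toList 0]
  have h0 : (0 : Int) + pvBal q.toList - pvBal q.toList = 0 := by ring
  rw [h0]
  have := final_assemble (pvSeg q.toList 0).1 (pvSeg q.toList 0).2
  simp only [List.nil_append, List.reverse_reverse, List.reverse_append,
    List.reverse_cons, List.reverse_nil] at *
  simpa using this
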